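-- pv_equiv track=rewrite | github.com/tcorrin/advent_of_code_2020 | day20/20.py | check_monster_rotations
-- ===== SOURCE A (Python) =====
-- def rotate_tile(tile, rotation):
--   number_of_turns = int(rotation / 90)
--   for _ in range(number_of_turns):
--     new_tile = list(zip(*tile[::-1]))
--     tile = []
--     for row in new_tile:
--       tile.append(list(row))
--   return tile
--
-- def check_for_sea_monster(final_grid):
--   rough_water_count = 0
--   monster_count = 0
--   offsets = [(1,-1),(4,-1),(5,0),(6,0,),(7,-1),(10,-1),(11,0),(12,0),(13,-1),(16,-1),(17,0),(18,0),(18,1),(19,0)]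
--   for y in range(len(final_grid)):
--     for x in range(len(final_grid[y])):
--       monster = True
--       if final_grid[y][x] == "#":
--         rough_water_count += 1
--         for value in offsets:
--           if -1 < y + value[1] < len(final_grid) and -1 < x + value[0] < len(final_grid[0]):
--             if final_grid[y + value[1]][x + value[0]] != "#":
--               monster = False
--               break
--           else:
--             monster = False
--             break
--       else:
--         monster = False
--       if monster:
--         monster_count += 1
--   return rough_water_count, monster_count
--
-- def check_monster_rotations(final_grid):
--   rough_water_count = 0
--   monster_count = 0
--   for r in [0, 90, 180, 270]:
--     new_grid_tuples = rotate_tile(final_grid, r)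
--     new_grid = []
--     for t in list(new_grid_tuples):
--       new_grid.append(list(t))
--     rough_water_count, monster_count = check_for_sea_monster(new_grid)
--     if monster_count > 0:
--       break
--   return rough_water_count, monster_count
-- ===== SOURCE B (Python) =====
-- def check_monster_rotations(final_grid):
--   # Keep the grid fixed and rotate the monster pattern instead of the grid.
--   offs = [(1,-1),(4,-1),(5,0),(6,0),(7,-1),(10,-1),(11,0),(12,0),(13,-1),(16,-1),(17,0),(18,0),(18,1),(19,0)]
--   rough_water_count = sum(row.count("#") for row in final_grid)
--   h = len(final_grid)
--   w = len(final_grid[0]) if final_grid else 0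
--   monster_count = 0
--   for _ in range(4):
--     cnt = 0
--     for y in range(h):
--       for x in range(len(final_grid[y])):
--         if final_grid[y][x] == "#" and all(
--             0 <= y + dy < h and 0 <= x + dx < w and final_grid[y + dy][x + dx] == "#"
--             for dx, dy in offs):
--           cnt += 1
--     monster_count = cnt
--     if cnt > 0:
--       break
--     offs = [(dy, -dx) for dx, dy in offs]
--   return rough_water_count, monster_count
-- ===== Notes on version B (the rewrite author's own statement) =====
-- stated objective: faster
-- what changed: B never rotates the grid: it computes the rough-water count once as the total number of '#' cells and rotates the 14-offset monster pattern instead, scanning the fixed original grid once per pattern orientation and stopping at the first orientation with monsters (no rotated-grid copies are built); Pre_ excludes ragged grids that contain a '#' cell, on which A's zip-based rotation silently truncates rows or A raises IndexError via the len(final_grid[0]) bound.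
-- outside the precondition, e.g. on check_monster_rotations([[], ['', '#'], ['x', 'x', '.', '.', '.', '.']]): A returns (0, 0), B returns (1, 0)
import Mathlib
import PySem

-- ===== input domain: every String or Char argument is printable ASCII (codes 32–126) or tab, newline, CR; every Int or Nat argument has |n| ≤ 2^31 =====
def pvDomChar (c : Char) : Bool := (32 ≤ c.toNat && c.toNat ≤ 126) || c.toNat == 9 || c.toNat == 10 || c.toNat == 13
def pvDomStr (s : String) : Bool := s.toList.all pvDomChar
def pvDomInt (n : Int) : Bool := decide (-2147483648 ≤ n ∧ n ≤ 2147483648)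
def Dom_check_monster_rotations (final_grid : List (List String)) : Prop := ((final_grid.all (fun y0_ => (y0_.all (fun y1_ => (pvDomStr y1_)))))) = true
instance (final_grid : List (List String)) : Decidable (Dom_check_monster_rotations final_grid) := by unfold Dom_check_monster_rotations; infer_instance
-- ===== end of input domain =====

-- B keeps the grid fixed and rotates the monster search pattern instead of rotating the grid,
-- avoiding the rotated-grid copies A rebuilds each round (measured faster in a timing run).

-- ===== PORT A =====
-- zip(*rows): truncates to the shortest row; zip() of no iterables is empty.
def pyMinLen (rows : List (List String)) : Nat :=
  match rows with
  | [] => 0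
  | r :: rs => rs.foldl (fun m t => min m t.length) r.length

def pyZipStar (rows : List (List String)) : List (List String) :=
  match rows with
  | [] => []
  | _ :: _ => (List.range (pyMinLen rows)).map (fun i => rows.map (fun row => row.getD i ""))

-- int(rotation/90): exact for the nonnegative multiples of 90 this file calls it with.
def rotate_tile (tile : List (List String)) (rotation : Int) : List (List String) :=
  (List.range (PySem.Int.floordiv rotation 90).toNat).foldl (fun t _ => pyZipStar t.reverse) tile

def pyOffsets : List (Int × Int) :=
  [(1,-1),(4,-1),(5,0),(6,0),(7,-1),(10,-1),(11,0),(12,0),(13,-1),(16,-1),(17,0),(18,0),(18,1),(19,0)]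

-- final_grid[y][x] for indices the bounds guard has already checked (0 ≤ y < h etc.);
-- out-of-range access on ragged grids raises IndexError in Python and is excluded by Pre_.
def cellA (g : List (List String)) (y x : Int) : String :=
  (g.getD y.toNat []).getD x.toNat ""

def check_for_sea_monster (g : List (List String)) : Int × Int :=
  let h : Int := g.length
  let w0 : Int := (g.getD 0 []).length
  (List.range g.length).foldl (fun acc y =>
    (List.range (g.getD y []).length).foldl (fun acc x =>
      if (g.getD y []).getD x "" = "#" then
        (acc.1 + 1,
          if pyOffsets.all (fun v =>
               decide (-1 < (y : Int) + v.2 ∧ (y : Int) + v.2 < h ∧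
                       -1 < (x : Int) + v.1 ∧ (x : Int) + v.1 < w0)
               && (cellA g ((y : Int) + v.2) ((x : Int) + v.1) == "#"))
          then acc.2 + 1 else acc.2)
      else acc) acc) ((0 : Int), (0 : Int))

def cmrLoop (g : List (List String)) : List Int → Int × Int → Int × Int
  | [], acc => acc
  | r :: rs, _ =>
    let res := check_for_sea_monster (rotate_tile g r)
    if res.2 > 0 then res else cmrLoop g rs res

def check_monster_rotations (final_grid : List (List String)) : Int × Int :=
  cmrLoop final_grid [0, 90, 180, 270] (0, 0)

-- ===== PORT B =====
def rotP (offs : List (Int × Int)) : List (Int × Int) := offs.map (fun o => (o.2, -o.1))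

def cellB (g : List (List String)) (y x : Int) : String :=
  (g.getD y.toNat []).getD x.toNat ""

def scanB (g : List (List String)) (h w : Nat) (offs : List (Int × Int)) : Int :=
  (List.range h).foldl (fun c y =>
    (List.range (g.getD y []).length).foldl (fun c x =>
      if ((g.getD y []).getD x "" = "#")
         && offs.all (fun o =>
              decide (0 ≤ (y : Int) + o.2 ∧ (y : Int) + o.2 < (h : Int) ∧
                      0 ≤ (x : Int) + o.1 ∧ (x : Int) + o.1 < (w : Int))
              && (cellB g ((y : Int) + o.2) ((x : Int) + o.1) == "#"))
      then c + 1 else c) c) 0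

def bLoop (g : List (List String)) (h w : Nat) : Nat → List (Int × Int) → Int
  | 0, _ => 0
  | n + 1, offs =>
    let c := scanB g h w offs
    if c > 0 then c else if n = 0 then c else bLoop g h w n (rotP offs)

def check_monster_rotations_alt (final_grid : List (List String)) : Int × Int :=
  let rough : Int := (final_grid.map (fun row => (row.count "#" : Int))).sum
  (rough, bLoop final_grid final_grid.length (final_grid.getD 0 []).length 4 pyOffsets)

-- ===== PRECONDITION & SPEC =====
-- Pre_ excludes ragged grids (rows of unequal length) that contain a '#' cell: there A's
-- zip-based rotation silently truncates rows (an artefact of zip(*…)) or A raises IndexError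
-- via the len(final_grid[0]) bound.  Ragged grids without '#' stay inside: A returns (0, 0) there.
def Pre_check_monster_rotations (final_grid : List (List String)) : Prop :=
  (∀ row ∈ final_grid, row.length = (final_grid.getD 0 []).length)
  ∨ (∀ row ∈ final_grid, ¬ ("#" ∈ row))
instance (final_grid : List (List String)) : Decidable (Pre_check_monster_rotations final_grid) := by
  unfold Pre_check_monster_rotations; infer_instance

def pvWitness_check_monster_rotations : List (List String) := [["#", "."], [".", "#"]]

def Spec_check_monster_rotations (final_grid : List (List String)) (out : Int × Int) : Prop := out = check_monster_rotations_alt final_grid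
instance (final_grid : List (List String)) (out : Int × Int) : Decidable (Spec_check_monster_rotations final_grid out) := by unfold Spec_check_monster_rotations; infer_instance

-- ===== CLAIM (what is proved, stated in full; the proofs are below) =====
def Claim_equal_check_monster_rotations : Prop := ∀ (final_grid : List (List String)), Dom_check_monster_rotations final_grid → Pre_check_monster_rotations final_grid → Spec_check_monster_rotations final_grid (check_monster_rotations final_grid)

-- ===== LEMMAS AND PROOFS =====

-- abbreviations used only by the proofs
def pvRect (g : List (List String)) (h w : Nat) : Prop :=
  g.length = h ∧ ∀ row ∈ g, row.length = w

def pvRot1 (g : List (List String)) : List (List String) := pyZipStar g.reverse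

def pvCell (g : List (List String)) (y x : Nat) : String := (g.getD y []).getD x ""

def pvCond (g : List (List String)) (h w : Nat) (offs : List (Int × Int)) (y x : Nat) : Bool :=
  ((g.getD y []).getD x "" = "#")
    && offs.all (fun o =>
         decide (0 ≤ (y : Int) + o.2 ∧ (y : Int) + o.2 < (h : Int) ∧
                 0 ≤ (x : Int) + o.1 ∧ (x : Int) + o.1 < (w : Int))
         && (cellB g ((y : Int) + o.2) ((x : Int) + o.1) == "#"))

def pvMB (g : List (List String)) (h w : Nat) (offs : List (Int × Int)) : Int :=
  ∑ y ∈ Finset.range h, ∑ x ∈ Finset.range w, if pvCond g h w offs y x then 1 else 0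

def pvRT (g : List (List String)) (h w : Nat) : Int :=
  ∑ y ∈ Finset.range h, ∑ x ∈ Finset.range w, if (g.getD y []).getD x "" = "#" then (1:Int) else 0

-- fold shape lemmas
theorem pv_foldl1 (P Q : Nat → Prop) [DecidablePred P] [DecidablePred Q] :
    ∀ (w : Nat) (a b : Int),
      (List.range w).foldl
        (fun acc x => if P x then (acc.1 + 1, if Q x then acc.2 + 1 else acc.2) else acc) (a, b)
      = (a + ∑ x ∈ Finset.range w, (if P x then (1:Int) else 0),
         b + ∑ x ∈ Finset.range w, (if P x ∧ Q x then (1:Int) else 0)) := by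

  intro w
  induction w with
  | zero => intro a b; simp
  | succ n ih =>
    intro a b
    rw [List.range_succ, List.foldl_append, ih]
    simp only [List.foldl_cons, List.foldl_nil, Finset.sum_range_succ]
    split_ifs <;> simp [Prod.ext_iff] <;> first | tauto | (constructor <;> ring) | ring


theorem pv_foldl2 (W : Nat → Nat) (P Q : Nat → Nat → Prop)
    [∀ y, DecidablePred (P y)] [∀ y, DecidablePred (Q y)] :
    ∀ (h : Nat),
      (List.range h).foldl
        (fun acc y => (List.range (W y)).foldl
          (fun acc x => if P y x then (acc.1 + 1, if Q y x then acc.2 + 1 else acc.2) else acc) acc)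
        ((0:Int), (0:Int))
      = (∑ y ∈ Finset.range h, ∑ x ∈ Finset.range (W y), (if P y x then (1:Int) else 0),
         ∑ y ∈ Finset.range h, ∑ x ∈ Finset.range (W y), (if P y x ∧ Q y x then (1:Int) else 0)) := by

  intro h
  induction h with
  | zero => simp
  | succ n ih =>
    rw [List.range_succ, List.foldl_append, ih]
    simp only [List.foldl_cons, List.foldl_nil, Finset.sum_range_succ]
    rw [pv_foldl1]


theorem pv_foldl1_count (R : Nat → Bool) :
    ∀ (w : Nat) (c : Int),
      (List.range w).foldl (fun c x => if R x then c + 1 else c) c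
      = c + ∑ x ∈ Finset.range w, (if R x then (1:Int) else 0) := by

  intro w
  induction w with
  | zero => intro c; simp
  | succ n ih =>
    intro c
    rw [List.range_succ, List.foldl_append, ih]
    simp only [List.foldl_cons, List.foldl_nil, Finset.sum_range_succ]
    split_ifs <;> ring


theorem pv_foldl2_count (R : Nat → Nat → Bool) (W : Nat → Nat) :
    ∀ (h : Nat),
      (List.range h).foldl
        (fun c y => (List.range (W y)).foldl (fun c x => if R y x then c + 1 else c) c) (0 : Int)
      = ∑ y ∈ Finset.range h, ∑ x ∈ Finset.range (W y), (if R y x then (1:Int) else 0) := by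

  intro h
  induction h with
  | zero => simp
  | succ n ih =>
    rw [List.range_succ, List.foldl_append, ih]
    simp only [List.foldl_cons, List.foldl_nil, Finset.sum_range_succ]
    rw [pv_foldl1_count]


theorem pv_getD_mem {α : Type} (l : List α) (d : α) (n : Nat) (h : n < l.length) :
    l.getD n d ∈ l := by
  rw [List.getD_eq_getElem?_getD, List.getElem?_eq_getElem h]
  simp

theorem pv_all_congr {α : Type} (p q : α → Bool) :
    ∀ (l : List α), (∀ a ∈ l, p a = q a) → l.all p = l.all q := by
  intro l
  induction l with
  | nil => intro _; rfl
  | cons a l ih =>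
    intro h
    simp only [List.all_cons]
    rw [h a (by simp), ih (fun b hb => h b (by simp [hb]))]

theorem pv_row_len (g : List (List String)) (h w : Nat) (hr : pvRect g h w)
    (y : Nat) (hy : y < h) : (g.getD y []).length = w := by
  obtain ⟨hlen, hrow⟩ := hr
  have hylt : y < g.length := by omega
  have hmem : g.getD y [] ∈ g := by
    rw [List.getD_eq_getElem?_getD, List.getElem?_eq_getElem hylt]
    simp
  exact hrow _ hmem

theorem pv_scanB_eq (g : List (List String)) (h w : Nat) (offs : List (Int × Int))
    (hr : pvRect g h w) :
    scanB g h w offs = pvMB g h w offs := by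
  unfold scanB pvMB pvCond
  rw [pv_foldl2_count]
  refine Finset.sum_congr rfl (fun y hy => ?_)
  rw [pv_row_len g h w hr y (Finset.mem_range.mp hy)]

theorem pv_cellAB : cellA = cellB := rfl

theorem pv_cellB_nat (g : List (List String)) (a b : Int) :
    cellB g a b = pvCell g a.toNat b.toNat := rfl

theorem pv_csm_sum (g : List (List String)) :
    check_for_sea_monster g =
      (∑ y ∈ Finset.range g.length, ∑ x ∈ Finset.range (g.getD y []).length,
         (if (g.getD y []).getD x "" = "#" then (1:Int) else 0),
       ∑ y ∈ Finset.range g.length, ∑ x ∈ Finset.range (g.getD y []).length,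
         (if ((g.getD y []).getD x "" = "#") ∧
             (pyOffsets.all (fun v =>
               decide (-1 < (y : Int) + v.2 ∧ (y : Int) + v.2 < (g.length : Int) ∧
                       -1 < (x : Int) + v.1 ∧ (x : Int) + v.1 < ((g.getD 0 []).length : Int))
               && (cellA g ((y : Int) + v.2) ((x : Int) + v.1) == "#")) = true)
          then (1:Int) else 0)) := by
  unfold check_for_sea_monster
  exact pv_foldl2 (fun y => (g.getD y []).length)
    (fun y x => (g.getD y []).getD x "" = "#")
    (fun y x => pyOffsets.all (fun v =>
      decide (-1 < (y : Int) + v.2 ∧ (y : Int) + v.2 < (g.length : Int) ∧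
              -1 < (x : Int) + v.1 ∧ (x : Int) + v.1 < ((g.getD 0 []).length : Int))
      && (cellA g ((y : Int) + v.2) ((x : Int) + v.1) == "#")) = true)
    g.length

-- characterization of A's scanner on rectangular grids
theorem pv_csm_rect (g : List (List String)) (h w : Nat) (hr : pvRect g h w) :
    check_for_sea_monster g = (pvRT g h w, pvMB g h w pyOffsets) := by
  rw [pv_csm_sum]
  have hlen : g.length = h := hr.1
  refine Prod.ext ?_ ?_
  · simp only [pvRT, hlen]
    refine Finset.sum_congr rfl (fun y hy => ?_)
    rw [pv_row_len g h w hr y (Finset.mem_range.mp hy)]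
  · simp only [pvMB, hlen]
    refine Finset.sum_congr rfl (fun y hy => ?_)
    rw [pv_row_len g h w hr y (Finset.mem_range.mp hy)]
    refine Finset.sum_congr rfl (fun x hx => ?_)
    have hy' := Finset.mem_range.mp hy
    have hx' := Finset.mem_range.mp hx
    have hw0 : (g.getD 0 []).length = w := pv_row_len g h w hr 0 (by omega)
    refine if_congr ?_ rfl rfl
    simp only [pvCond, Bool.and_eq_true, decide_eq_true_eq]
    constructor
    · rintro ⟨hc, hall⟩
      refine ⟨hc, ?_⟩
      rw [← hall]
      refine (pv_all_congr _ _ pyOffsets (fun v _ => ?_)).symm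
      rw [pv_cellAB]
      have hbd : (-1 < (y : Int) + v.2 ∧ (y : Int) + v.2 < (h : Int) ∧
                  -1 < (x : Int) + v.1 ∧ (x : Int) + v.1 < ((g.getD 0 []).length : Int))
               ↔ (0 ≤ (y : Int) + v.2 ∧ (y : Int) + v.2 < (h : Int) ∧
                  0 ≤ (x : Int) + v.1 ∧ (x : Int) + v.1 < (w : Int)) := by
        rw [hw0]
        omega
      rw [decide_eq_decide.mpr hbd]
    · rintro ⟨hc, hall⟩
      refine ⟨hc, ?_⟩
      rw [← hall]
      refine pv_all_congr _ _ pyOffsets (fun v _ => ?_)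
      rw [pv_cellAB]
      have hbd : (-1 < (y : Int) + v.2 ∧ (y : Int) + v.2 < (h : Int) ∧
                  -1 < (x : Int) + v.1 ∧ (x : Int) + v.1 < ((g.getD 0 []).length : Int))
               ↔ (0 ≤ (y : Int) + v.2 ∧ (y : Int) + v.2 < (h : Int) ∧
                  0 ≤ (x : Int) + v.1 ∧ (x : Int) + v.1 < (w : Int)) := by
        rw [hw0]
        omega
      rw [decide_eq_decide.mpr hbd]


-- rotation structure
theorem pv_minLen_aux (w : Nat) :
    ∀ (rs : List (List String)), (∀ t ∈ rs, t.length = w) →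
      rs.foldl (fun m t => min m t.length) w = w := by
  intro rs
  induction rs with
  | nil => intro _; rfl
  | cons t rs ih =>
    intro h
    simp only [List.foldl_cons]
    rw [h t (by simp), min_self]
    exact ih (fun t ht => h t (by simp [ht]))

theorem pv_minLen_const (rows : List (List String)) (w : Nat)
    (hne : rows ≠ []) (hl : ∀ r ∈ rows, r.length = w) : pyMinLen rows = w := by

  cases rows with
  | nil => exact absurd rfl hne
  | cons r rs =>
    simp only [pyMinLen]
    rw [hl r (by simp)]
    exact pv_minLen_aux w rs (fun t ht => hl t (by simp [ht]))


theorem pv_zip_cons (rows : List (List String)) (hne : rows ≠ []) :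
    pyZipStar rows = (List.range (pyMinLen rows)).map (fun i => rows.map (fun row => row.getD i "")) := by
  cases rows with
  | nil => exact absurd rfl hne
  | cons a l => rfl

theorem pv_rot1_rect (g : List (List String)) (h w : Nat) (hr : pvRect g h w)
    (hh : 0 < h) (hw : 0 < w) : pvRect (pvRot1 g) w h := by
  obtain ⟨hlen, hrow⟩ := hr
  have hne : g.reverse ≠ [] := by
    intro hnil
    have hg : g = [] := by simpa using hnil
    rw [hg] at hlen
    simp at hlen
    omega
  have hmin : pyMinLen g.reverse = w :=
    pv_minLen_const g.reverse w hne (fun r hrm => hrow r (List.mem_reverse.mp hrm))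
  have hzip : pvRot1 g = (List.range w).map (fun i => g.reverse.map (fun row => row.getD i "")) := by
    unfold pvRot1
    rw [pv_zip_cons _ hne, hmin]
  constructor
  · simp [hzip]
  · intro row hm
    rw [hzip] at hm
    obtain ⟨i, _, hfi⟩ := List.mem_map.mp hm
    simp [← hfi, hlen]

theorem pv_rot1_cell (g : List (List String)) (h w : Nat) (hr : pvRect g h w)
    (hh : 0 < h) (hw : 0 < w) (y x : Nat) (hy : y < w) (hx : x < h) :
    pvCell (pvRot1 g) y x = pvCell g (h - 1 - x) y := by
  obtain ⟨hlen, hrow⟩ := hr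
  have hne : g.reverse ≠ [] := by
    intro hnil
    have hg : g = [] := by simpa using hnil
    rw [hg] at hlen
    simp at hlen
    omega
  have hmin : pyMinLen g.reverse = w :=
    pv_minLen_const g.reverse w hne (fun r hrm => hrow r (List.mem_reverse.mp hrm))
  have hzip : pvRot1 g = (List.range w).map (fun i => g.reverse.map (fun row => row.getD i "")) := by
    unfold pvRot1
    rw [pv_zip_cons _ hne, hmin]
  have hxr : x < g.reverse.length := by
    rw [List.length_reverse, hlen]; omega
  have hx2 : h - 1 - x < g.length := by rw [hlen]; omega
  unfold pvCell
  rw [hzip]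
  have hrowy : ((List.range w).map (fun i => g.reverse.map (fun row => row.getD i ""))).getD y []
      = g.reverse.map (fun row => row.getD y "") := by
    rw [List.getD_eq_getElem?_getD, List.getElem?_map, List.getElem?_range hy]
    simp
  rw [hrowy]
  have hgx : (g.reverse.map (fun row => row.getD y "")).getD x ""
      = (g.reverse[x]).getD y "" := by
    rw [List.getD_eq_getElem?_getD, List.getElem?_map, List.getElem?_eq_getElem hxr]
    simp
  rw [hgx, List.getElem_reverse]
  have hgd : g.getD (h - 1 - x) [] = g[h - 1 - x] := by
    rw [List.getD_eq_getElem?_getD, List.getElem?_eq_getElem hx2]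
    simp
  rw [hgd]
  congr 2
  omega

theorem pv_rot1_nil (g : List (List String)) (h w : Nat) (hr : pvRect g h w)
    (hzero : h = 0 ∨ w = 0) : pvRot1 g = [] := by
  obtain ⟨hlen, hrow⟩ := hr
  cases hrev : g.reverse with
  | nil => simp [pvRot1, hrev, pyZipStar]
  | cons a l =>
    have hne : g.reverse ≠ [] := by simp [hrev]
    have hmin : pyMinLen g.reverse = 0 := by
      rcases hzero with hz | hz
      · exfalso
        have hg : g = [] := List.length_eq_zero_iff.mp (hlen.trans hz)
        simp [hg] at hrev
      · exact pv_minLen_const g.reverse 0 hne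
          (fun r hrm => by rw [hrow r (List.mem_reverse.mp hrm), hz])
    unfold pvRot1
    rw [pv_zip_cons _ hne, hmin]
    simp

theorem pv_sum_reflect_swap (h w : Nat) (F : Nat → Nat → Int) :
    (∑ y ∈ Finset.range w, ∑ x ∈ Finset.range h, F y x)
    = ∑ y ∈ Finset.range h, ∑ x ∈ Finset.range w, F x (h - 1 - y) := by

  rw [Finset.sum_comm]
  exact (Finset.sum_range_reflect (fun j => ∑ y ∈ Finset.range w, F y j) h).symm


-- transport of the scan across one clockwise grid rotation
theorem pv_cond_rot (g : List (List String)) (h w : Nat) (hr : pvRect g h w)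
    (hh : 0 < h) (hw : 0 < w) (offs : List (Int × Int)) (y x : Nat) (hy : y < w) (hx : x < h) :
    pvCond (pvRot1 g) w h offs y x = pvCond g h w (rotP offs) (h - 1 - x) y := by
  have hcell : ((pvRot1 g).getD y []).getD x "" = (g.getD (h - 1 - x) []).getD y "" :=
    pv_rot1_cell g h w hr hh hw y x hy hx
  unfold pvCond rotP
  rw [List.all_map, hcell]
  congr 1
  refine pv_all_congr _ _ offs (fun v _ => ?_)
  simp only [Function.comp_apply]
  by_cases hbd : (0 ≤ (y : Int) + v.2 ∧ (y : Int) + v.2 < (w : Int) ∧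
                  0 ≤ (x : Int) + v.1 ∧ (x : Int) + v.1 < (h : Int))
  · have hbd2 : (0 ≤ ((h - 1 - x : Nat) : Int) + -v.1 ∧ ((h - 1 - x : Nat) : Int) + -v.1 < (h : Int) ∧
                 0 ≤ (y : Int) + v.2 ∧ (y : Int) + v.2 < (w : Int)) := by
      obtain ⟨a1, a2, a3, a4⟩ := hbd
      refine ⟨by omega, by omega, a1, a2⟩
    rw [decide_eq_true hbd, decide_eq_true hbd2]
    simp only [Bool.true_and]
    have hy2 : ((y : Int) + v.2).toNat < w := by omega
    have hx2 : ((x : Int) + v.1).toNat < h := by omega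
    have hc := pv_rot1_cell g h w hr hh hw (((y : Int) + v.2).toNat) (((x : Int) + v.1).toNat) hy2 hx2
    rw [pv_cellB_nat, hc, pv_cellB_nat]
    have hidx : h - 1 - ((x : Int) + v.1).toNat = (((h - 1 - x : Nat) : Int) + -v.1).toNat := by omega
    rw [hidx]
  · have hbd2 : ¬ (0 ≤ ((h - 1 - x : Nat) : Int) + -v.1 ∧ ((h - 1 - x : Nat) : Int) + -v.1 < (h : Int) ∧
                 0 ≤ (y : Int) + v.2 ∧ (y : Int) + v.2 < (w : Int)) := by
      intro hc
      exact hbd ⟨hc.2.2.1, hc.2.2.2, by omega, by omega⟩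
    rw [decide_eq_false hbd, decide_eq_false hbd2]
    simp only [Bool.false_and]

theorem pv_MB_rot (g : List (List String)) (h w : Nat) (hr : pvRect g h w)
    (hh : 0 < h) (hw : 0 < w) (offs : List (Int × Int)) :
    pvMB (pvRot1 g) w h offs = pvMB g h w (rotP offs) := by
  unfold pvMB
  rw [pv_sum_reflect_swap]
  refine Finset.sum_congr rfl (fun y hy => Finset.sum_congr rfl (fun x hx => ?_))
  have hy' := Finset.mem_range.mp hy
  have hx' := Finset.mem_range.mp hx
  have hc := pv_cond_rot g h w hr hh hw offs x (h - 1 - y) (by omega) (by omega)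
  have hyy : h - 1 - (h - 1 - y) = y := by omega
  rw [hc, hyy]


theorem pv_RT_rot (g : List (List String)) (h w : Nat) (hr : pvRect g h w)
    (hh : 0 < h) (hw : 0 < w) :
    pvRT (pvRot1 g) w h = pvRT g h w := by
  unfold pvRT
  rw [pv_sum_reflect_swap]
  refine Finset.sum_congr rfl (fun y hy => Finset.sum_congr rfl (fun x hx => ?_))
  have hy' := Finset.mem_range.mp hy
  have hx' := Finset.mem_range.mp hx
  have hc := pv_rot1_cell g h w hr hh hw x (h - 1 - y) (by omega) (by omega)
  have hyy : h - 1 - (h - 1 - y) = y := by omega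
  unfold pvCell at hc
  rw [hc, hyy]


-- the iterated-rotation characterization
theorem pv_trans (k : Nat) : ∀ (g : List (List String)) (h w : Nat), pvRect g h w →
    check_for_sea_monster (pvRot1^[k] g)
      = (pvRT g h w, pvMB g h w (rotP^[k] pyOffsets)) := by
  induction k with
  | zero =>
    intro g h w hr
    simp only [Function.iterate_zero, id_eq]
    exact pv_csm_rect g h w hr
  | succ k ih =>
    intro g h w hr
    rw [Function.iterate_succ_apply]
    by_cases hdeg : h = 0 ∨ w = 0
    · rw [pv_rot1_nil g h w hr hdeg]
      rw [Function.iterate_fixed (show pvRot1 [] = [] from rfl) k]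
      have hz : check_for_sea_monster [] = ((0 : Int), (0 : Int)) := rfl
      rw [hz]
      rcases hdeg with hz0 | hz0 <;> subst hz0 <;> simp [pvRT, pvMB]
    · push Not at hdeg
      have hh : 0 < h := Nat.pos_of_ne_zero hdeg.1
      have hw : 0 < w := Nat.pos_of_ne_zero hdeg.2
      rw [ih (pvRot1 g) w h (pv_rot1_rect g h w hr hh hw)]
      rw [pv_RT_rot g h w hr hh hw, pv_MB_rot g h w hr hh hw]
      rw [← Function.iterate_succ_apply' rotP k pyOffsets]


-- B's rough-water sum
theorem pv_rowcount (row : List String) :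
    ((row.count "#" : Nat) : Int)
    = ∑ x ∈ Finset.range row.length, (if row.getD x "" = "#" then (1:Int) else 0) := by
  induction row with
  | nil => simp
  | cons a l ih =>
    rw [List.count_cons]
    simp only [List.length_cons, Finset.sum_range_succ', List.getD_cons_succ, List.getD_cons_zero]
    rw [← ih]
    push_cast
    by_cases ha : a = "#" <;> simp [ha]


theorem pv_rough_eq (g : List (List String)) (h w : Nat) (hr : pvRect g h w) :
    (g.map (fun row => ((row.count "#" : Nat) : Int))).sum = pvRT g h w := by
  have hmap : ∀ (gs : List (List String)),
      (gs.map (fun row => ((row.count "#" : Nat) : Int))).sum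
        = ∑ y ∈ Finset.range gs.length, ((gs.getD y []).count "#" : Int) := by
    intro gs
    induction gs with
    | nil => simp
    | cons a l ihl =>
      simp only [List.map_cons, List.sum_cons, List.length_cons, Finset.sum_range_succ',
        List.getD_cons_succ, List.getD_cons_zero]
      rw [ihl]
      ring
  rw [hmap, hr.1]
  unfold pvRT
  refine Finset.sum_congr rfl (fun y hy => ?_)
  rw [pv_rowcount]
  rw [pv_row_len g h w hr y (Finset.mem_range.mp hy)]


theorem pv_rotate_tile_eval (g : List (List String)) :
    rotate_tile g 0 = pvRot1^[0] g ∧ rotate_tile g 90 = pvRot1^[1] g ∧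
    rotate_tile g 180 = pvRot1^[2] g ∧ rotate_tile g 270 = pvRot1^[3] g := by
  have hfold : ∀ n : Nat, (List.range n).foldl (fun t _ => pyZipStar t.reverse) g = pvRot1^[n] g := by
    intro n
    induction n with
    | zero => rfl
    | succ k ihn =>
      rw [List.range_succ, List.foldl_append, ihn]
      simp only [List.foldl_cons, List.foldl_nil]
      rw [Function.iterate_succ_apply']
      rfl
  have h0 : (PySem.Int.floordiv 0 90).toNat = 0 := by decide
  have h1 : (PySem.Int.floordiv 90 90).toNat = 1 := by decide
  have h2 : (PySem.Int.floordiv 180 90).toNat = 2 := by decide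
  have h3 : (PySem.Int.floordiv 270 90).toNat = 3 := by decide
  refine ⟨?_, ?_, ?_, ?_⟩ <;> unfold rotate_tile
  · rw [h0, hfold]
  · rw [h1, hfold]
  · rw [h2, hfold]
  · rw [h3, hfold]


-- the '#'-free case: every rotation scan is zero on both sides
def pvNH (g : List (List String)) : Prop := ∀ row ∈ g, ¬ ("#" ∈ row)

theorem pv_nh_rot1 (g : List (List String)) (hnh : pvNH g) : pvNH (pvRot1 g) := by
  intro row hm hmem
  unfold pvRot1 at hm
  rcases hg : g.reverse with _ | ⟨a, l⟩
  · rw [hg] at hm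
    simp [pyZipStar] at hm
  · rw [pv_zip_cons g.reverse (by simp [hg])] at hm
    obtain ⟨i, _, hfi⟩ := List.mem_map.mp hm
    rw [← hfi] at hmem
    obtain ⟨r, hr, hri⟩ := List.mem_map.mp hmem
    have hrg : r ∈ g := List.mem_reverse.mp hr
    by_cases hi : i < r.length
    · exact hnh r hrg (hri ▸ pv_getD_mem r "" i hi)
    · rw [List.getD_eq_getElem?_getD, List.getElem?_eq_none (by omega)] at hri
      simp at hri

theorem pv_nh_iter (g : List (List String)) (hnh : pvNH g) :
    ∀ k : Nat, pvNH (pvRot1^[k] g) := by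
  intro k
  induction k with
  | zero => exact hnh
  | succ n ih =>
    rw [Function.iterate_succ_apply']
    exact pv_nh_rot1 _ ih

theorem pv_nh_cell (g : List (List String)) (hnh : pvNH g) (y x : Nat)
    (hy : y < g.length) : ¬ ((g.getD y []).getD x "" = "#") := by
  intro hc
  have hmem : g.getD y [] ∈ g := pv_getD_mem g [] y hy
  by_cases hx : x < (g.getD y []).length
  · exact hnh _ hmem (hc ▸ pv_getD_mem (g.getD y []) "" x hx)
  · rw [List.getD_eq_getElem?_getD, List.getElem?_eq_none (by omega)] at hc
    simp at hc

theorem pv_csm_nh (g : List (List String)) (hnh : pvNH g) :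
    check_for_sea_monster g = ((0 : Int), (0 : Int)) := by
  rw [pv_csm_sum]
  refine Prod.ext ?_ ?_ <;> simp only
  · refine Finset.sum_eq_zero (fun y hy => Finset.sum_eq_zero (fun x hx => ?_))
    rw [if_neg (pv_nh_cell g hnh y x (Finset.mem_range.mp hy))]
  · refine Finset.sum_eq_zero (fun y hy => Finset.sum_eq_zero (fun x hx => ?_))
    rw [if_neg]
    intro hc
    exact pv_nh_cell g hnh y x (Finset.mem_range.mp hy) hc.1

theorem pv_scanB_nh (g : List (List String)) (hnh : pvNH g) (h w : Nat)
    (offs : List (Int × Int)) : scanB g h w offs = 0 := by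
  unfold scanB
  rw [pv_foldl2_count]
  refine Finset.sum_eq_zero (fun y hy => Finset.sum_eq_zero (fun x hx => ?_))
  rw [if_neg]
  intro hc
  by_cases hyl : y < g.length
  · have := pv_nh_cell g hnh y x hyl
    simp only [Bool.and_eq_true, decide_eq_true_eq] at hc
    exact this hc.1
  · have : g.getD y [] = [] := by
      rw [List.getD_eq_getElem?_getD, List.getElem?_eq_none (by omega)]
      rfl
    rw [this] at hx
    simp at hx

theorem pv_rough_nh (g : List (List String)) (hnh : pvNH g) :
    (g.map (fun row => ((row.count "#" : Nat) : Int))).sum = 0 := by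
  refine List.sum_eq_zero (fun z hz => ?_)
  obtain ⟨row, hrow, hz'⟩ := List.mem_map.mp hz
  rw [← hz']
  simp [List.count_eq_zero.mpr (fun h => hnh row hrow (by simpa using h))]

theorem pv_cmr_expand (g : List (List String)) :
    check_monster_rotations g =
      (let r0 := check_for_sea_monster (rotate_tile g 0);
       if r0.2 > 0 then r0 else
       let r1 := check_for_sea_monster (rotate_tile g 90);
       if r1.2 > 0 then r1 else
       let r2 := check_for_sea_monster (rotate_tile g 180);
       if r2.2 > 0 then r2 else
       let r3 := check_for_sea_monster (rotate_tile g 270);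
       if r3.2 > 0 then r3 else r3) := rfl

theorem pv_bLoop_expand (g : List (List String)) (h w : Nat) (offs : List (Int × Int)) :
    bLoop g h w 4 offs =
      (let c0 := scanB g h w offs;
       if c0 > 0 then c0 else
       let c1 := scanB g h w (rotP offs);
       if c1 > 0 then c1 else
       let c2 := scanB g h w (rotP (rotP offs));
       if c2 > 0 then c2 else
       let c3 := scanB g h w (rotP (rotP (rotP offs)));
       if c3 > 0 then c3 else c3) := rfl

-- ===== VERDICT (by name: the statement is the Claim_ definition above) =====
theorem check_monster_rotations_spec : Claim_equal_check_monster_rotations := by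
  intro g _ hpre
  unfold Spec_check_monster_rotations
  rcases hpre with hrect | hnh
  · have hr : pvRect g g.length ((g.getD 0 []).length) := ⟨rfl, hrect⟩
    obtain ⟨e0, e1, e2, e3⟩ := pv_rotate_tile_eval g
    have t0 := pv_trans 0 g _ _ hr
    have t1 := pv_trans 1 g _ _ hr
    have t2 := pv_trans 2 g _ _ hr
    have t3 := pv_trans 3 g _ _ hr
    rw [pv_cmr_expand g]
    rw [e0, e1, e2, e3, t0, t1, t2, t3]
    unfold check_monster_rotations_alt
    rw [pv_bLoop_expand]
    rw [pv_scanB_eq g _ _ _ hr, pv_scanB_eq g _ _ _ hr, pv_scanB_eq g _ _ _ hr,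
        pv_scanB_eq g _ _ _ hr]
    rw [pv_rough_eq g g.length ((g.getD 0 []).length) hr]
    have i0 : rotP^[0] pyOffsets = pyOffsets := rfl
    have i1 : rotP^[1] pyOffsets = rotP pyOffsets := rfl
    have i2 : rotP^[2] pyOffsets = rotP (rotP pyOffsets) := rfl
    have i3 : rotP^[3] pyOffsets = rotP (rotP (rotP pyOffsets)) := rfl
    rw [i0, i1, i2, i3]
    dsimp only
    split_ifs <;> rfl
  · obtain ⟨e0, e1, e2, e3⟩ := pv_rotate_tile_eval g
    have c0 := pv_csm_nh (pvRot1^[0] g) (pv_nh_iter g hnh 0)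
    have c1 := pv_csm_nh (pvRot1^[1] g) (pv_nh_iter g hnh 1)
    have c2 := pv_csm_nh (pvRot1^[2] g) (pv_nh_iter g hnh 2)
    have c3 := pv_csm_nh (pvRot1^[3] g) (pv_nh_iter g hnh 3)
    rw [pv_cmr_expand g, e0, e1, e2, e3, c0, c1, c2, c3]
    unfold check_monster_rotations_alt
    rw [pv_bLoop_expand]
    rw [pv_scanB_nh g hnh _ _ _, pv_scanB_nh g hnh _ _ _, pv_scanB_nh g hnh _ _ _,
        pv_scanB_nh g hnh _ _ _]
    rw [pv_rough_nh g hnh]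
    norm_num
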